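-- pv_equiv track=rewrite | github.com/DICAP1/market_conditions | market_conditions_analyser4.py | final_strategy_decision
-- ===== SOURCE A (Python) =====
-- def final_strategy_decision(all_signals):
--     weights = {
--         "Strong Trend": 3, "Weak Trend": 1,
--         "Momentum: Strong Upward (Long Position)": 2,
--         "Momentum: Strong Downward (Short Position)": 2,
--         "Bullish MACD Signal": 2, "Bearish MACD Signal": 2,
--         "Breakout Detected": 3, "High Volatility Cluster Detected": 2,
--         "Widened Spread Detected": 1
--     }
--     totals = {"Buy Strategy": 0, "Sell Strategy": 0, "Neutral Strategy": 0, "Scalping Strategy": 0,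
--               "Caution Strategy": 0}
--     for sigs in all_signals:
--         for s in sigs:
--             wt = weights.get(s, 0)
--             if "Upward" in s or "Bullish" in s:
--                 totals["Buy Strategy"] += wt
--             elif "Downward" in s or "Bearish" in s:
--                 totals["Sell Strategy"] += wt
--             elif "Neutral" in s:
--                 totals["Neutral Strategy"] += wt
--             elif "Scalping" in s:
--                 totals["Scalping Strategy"] += wt
--             elif "Caution" in s:
--                 totals["Caution Strategy"] += wt
--     return max(totals, key=totals.get)
-- ===== SOURCE B (Python) =====
-- # Only four of the weighted signals ever match a bucket substring, and the three
-- # non-Buy/Sell buckets can never outscore Buy (first key, score >= 0), so it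
-- # suffices to count buy and sell signals and compare.
-- _BUY = {"Momentum: Strong Upward (Long Position)", "Bullish MACD Signal"}
-- _SELL = {"Momentum: Strong Downward (Short Position)", "Bearish MACD Signal"}
--
-- def final_strategy_decision(all_signals):
--     buy = sell = 0
--     for sigs in all_signals:
--         for s in sigs:
--             if s in _BUY:
--                 buy += 1
--             elif s in _SELL:
--                 sell += 1
--     return "Buy Strategy" if buy >= sell else "Sell Strategy"
-- ===== Notes on version B (the rewrite author's own statement) =====
-- stated objective: simpler
-- what changed: Replaces the weights dict, the five-bucket totals dict, the substring-cascade and the final max() by two plain counters over the only four signal strings that can ever contribute, returning Buy on ties (max's insertion-order tie-break) and Sell otherwise.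
import Mathlib
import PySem

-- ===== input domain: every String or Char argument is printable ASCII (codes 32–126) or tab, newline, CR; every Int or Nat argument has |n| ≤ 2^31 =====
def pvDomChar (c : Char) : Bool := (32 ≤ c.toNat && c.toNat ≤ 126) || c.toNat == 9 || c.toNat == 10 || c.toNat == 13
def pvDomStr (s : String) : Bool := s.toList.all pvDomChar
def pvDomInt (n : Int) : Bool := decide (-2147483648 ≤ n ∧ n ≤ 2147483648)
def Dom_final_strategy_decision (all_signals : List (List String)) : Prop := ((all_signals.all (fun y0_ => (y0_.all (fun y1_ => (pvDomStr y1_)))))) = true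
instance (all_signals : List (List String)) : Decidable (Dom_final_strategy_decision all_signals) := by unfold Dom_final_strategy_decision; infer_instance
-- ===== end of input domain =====

-- B replaces the two dicts, the substring cascade and the final max() by two plain counters
-- over the only four signal strings that can ever contribute; objective: simpler.

-- ===== PORT A =====
def final_strategy_decision (all_signals : List (List String)) : String :=
  let weights : PySem.Dict String Int := PySem.Dict.ofList [
    ("Strong Trend", 3), ("Weak Trend", 1),
    ("Momentum: Strong Upward (Long Position)", 2),
    ("Momentum: Strong Downward (Short Position)", 2),
    ("Bullish MACD Signal", 2), ("Bearish MACD Signal", 2),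
    ("Breakout Detected", 3), ("High Volatility Cluster Detected", 2),
    ("Widened Spread Detected", 1)]
  let totals : PySem.Dict String Int := PySem.Dict.ofList [
    ("Buy Strategy", 0), ("Sell Strategy", 0), ("Neutral Strategy", 0),
    ("Scalping Strategy", 0), ("Caution Strategy", 0)]
  let totals := all_signals.foldl (fun totals sigs =>
    sigs.foldl (fun totals s =>
      let wt := weights.getD s 0
      if PySem.Str.isIn "Upward" s || PySem.Str.isIn "Bullish" s then
        totals.modify "Buy Strategy" 0 (· + wt)
      else if PySem.Str.isIn "Downward" s || PySem.Str.isIn "Bearish" s then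
        totals.modify "Sell Strategy" 0 (· + wt)
      else if PySem.Str.isIn "Neutral" s then
        totals.modify "Neutral Strategy" 0 (· + wt)
      else if PySem.Str.isIn "Scalping" s then
        totals.modify "Scalping Strategy" 0 (· + wt)
      else if PySem.Str.isIn "Caution" s then
        totals.modify "Caution Strategy" 0 (· + wt)
      else totals) totals) totals
  -- totals always has five keys, so Python's max never sees an empty dict; .getD "" only totalises
  (PySem.List.max? totals.keys (fun k => totals.getD k 0)).getD ""

-- ===== PORT B =====
-- B-side helpers: the module-level _BUY / _SELL sets of Source B
def pvBuySignals : List String :=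
  ["Momentum: Strong Upward (Long Position)", "Bullish MACD Signal"]
def pvSellSignals : List String :=
  ["Momentum: Strong Downward (Short Position)", "Bearish MACD Signal"]

def final_strategy_decision_alt (all_signals : List (List String)) : String :=
  let p : Int × Int := all_signals.foldl (fun acc sigs =>
    sigs.foldl (fun (p : Int × Int) s =>
      if pvBuySignals.contains s then (p.1 + 1, p.2)
      else if pvSellSignals.contains s then (p.1, p.2 + 1)
      else p) acc) (0, 0)
  if p.2 ≤ p.1 then "Buy Strategy" else "Sell Strategy"

-- ===== PRECONDITION & SPEC =====
def Spec_final_strategy_decision (all_signals : List (List String)) (out : String) : Prop := out = final_strategy_decision_alt all_signals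
instance (all_signals : List (List String)) (out : String) : Decidable (Spec_final_strategy_decision all_signals out) := by unfold Spec_final_strategy_decision; infer_instance

-- ===== CLAIM (what is proved, stated in full; the proofs are below) =====
def Claim_equal_final_strategy_decision : Prop := ∀ (all_signals : List (List String)), Dom_final_strategy_decision all_signals → Spec_final_strategy_decision all_signals (final_strategy_decision all_signals)

-- ===== LEMMAS AND PROOFS =====

-- A's weights dict, named for the lemmas
def pvWeights : PySem.Dict String Int := PySem.Dict.ofList [
  ("Strong Trend", 3), ("Weak Trend", 1),
  ("Momentum: Strong Upward (Long Position)", 2),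
  ("Momentum: Strong Downward (Short Position)", 2),
  ("Bullish MACD Signal", 2), ("Bearish MACD Signal", 2),
  ("Breakout Detected", 3), ("High Volatility Cluster Detected", 2),
  ("Widened Spread Detected", 1)]

-- the shape A's totals dict keeps forever: only the first two values ever change
def mkTotals (b s : Int) : PySem.Dict String Int := PySem.Dict.mk [
  ("Buy Strategy", b), ("Sell Strategy", s), ("Neutral Strategy", 0),
  ("Scalping Strategy", 0), ("Caution Strategy", 0)]

-- the two inner loop bodies, named
def pvStepA (totals : PySem.Dict String Int) (s : String) : PySem.Dict String Int :=
  let wt := pvWeights.getD s 0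
  if PySem.Str.isIn "Upward" s || PySem.Str.isIn "Bullish" s then
    totals.modify "Buy Strategy" 0 (· + wt)
  else if PySem.Str.isIn "Downward" s || PySem.Str.isIn "Bearish" s then
    totals.modify "Sell Strategy" 0 (· + wt)
  else if PySem.Str.isIn "Neutral" s then
    totals.modify "Neutral Strategy" 0 (· + wt)
  else if PySem.Str.isIn "Scalping" s then
    totals.modify "Scalping Strategy" 0 (· + wt)
  else if PySem.Str.isIn "Caution" s then
    totals.modify "Caution Strategy" 0 (· + wt)
  else totals

def pvStepB (p : Int × Int) (s : String) : Int × Int :=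
  if pvBuySignals.contains s then (p.1 + 1, p.2)
  else if pvSellSignals.contains s then (p.1, p.2 + 1)
  else p

lemma pvA_unfold (all_signals : List (List String)) :
    final_strategy_decision all_signals =
    (let t := all_signals.foldl (fun t sigs => sigs.foldl pvStepA t) (mkTotals 0 0)
     (PySem.List.max? t.keys (fun k => t.getD k 0)).getD "") := rfl

lemma pvB_unfold (all_signals : List (List String)) :
    final_strategy_decision_alt all_signals =
    (let p := all_signals.foldl (fun acc sigs => sigs.foldl pvStepB acc) ((0, 0) : Int × Int)
     if p.2 ≤ p.1 then "Buy Strategy" else "Sell Strategy") := rfl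

-- per-signal effect of A's branch cascade on the totals shape, phrased with B's tables
lemma pvStepA_eq (x y : Int) (s : String) :
    pvStepA (mkTotals x y) s =
    mkTotals (if pvBuySignals.contains s then x + 2 else x)
             (if pvSellSignals.contains s then y + 2 else y) := by
  by_cases h9 : s ∈ (["Strong Trend", "Weak Trend",
      "Momentum: Strong Upward (Long Position)", "Momentum: Strong Downward (Short Position)",
      "Bullish MACD Signal", "Bearish MACD Signal", "Breakout Detected",
      "High Volatility Cluster Detected", "Widened Spread Detected"] : List String)
  · fin_cases h9 <;> rfl
  · -- s is not a weighted signal: wt = 0, so whatever branch fires, nothing changes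
    simp only [List.mem_cons, not_or] at h9
    obtain ⟨h1, h2, h3, h4, h5, h6, h7, h8, h9, -⟩ := h9
    have hB : pvBuySignals.contains s = false := by simp [pvBuySignals, h3, h5]
    have hS : pvSellSignals.contains s = false := by simp [pvSellSignals, h4, h6]
    rw [hB, hS]
    simp only [Bool.false_eq_true, if_false]
    have hwt : pvWeights.getD s 0 = 0 := by
      have hmk : pvWeights = PySem.Dict.mk [
        ("Strong Trend", 3), ("Weak Trend", 1),
        ("Momentum: Strong Upward (Long Position)", 2),
        ("Momentum: Strong Downward (Short Position)", 2),
        ("Bullish MACD Signal", 2), ("Bearish MACD Signal", 2),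
        ("Breakout Detected", 3), ("High Volatility Cluster Detected", 2),
        ("Widened Spread Detected", 1)] := rfl
      rw [PySem.Dict.getD_eq_get?_getD, hmk]
      simp [Ne.symm h1, Ne.symm h2, Ne.symm h3, Ne.symm h4,
        Ne.symm h5, Ne.symm h6, Ne.symm h7, Ne.symm h8, Ne.symm h9, PySem.Dict.get?]
    simp only [pvStepA, hwt]
    split_ifs <;> (apply PySem.Dict.ext; simp [mkTotals, PySem.Dict.modify, PySem.Dict.insert,
      PySem.Dict.getD, PySem.Dict.get?])

-- A's totals stay at exactly twice B's counters
lemma pvStep_rel (b s : Int) (str : String) :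
    pvStepA (mkTotals (2 * b) (2 * s)) str =
    mkTotals (2 * (pvStepB (b, s) str).1) (2 * (pvStepB (b, s) str).2) := by
  rw [pvStepA_eq]
  unfold pvStepB
  split_ifs with hB hS
  · exfalso; simp [pvBuySignals, pvSellSignals] at hB hS
    rcases hB with rfl | rfl <;> simp at hS
  all_goals simp [mkTotals] <;> ring

lemma pvInner_rel (sigs : List String) (b s : Int) :
    sigs.foldl pvStepA (mkTotals (2 * b) (2 * s)) =
    mkTotals (2 * (sigs.foldl pvStepB (b, s)).1) (2 * (sigs.foldl pvStepB (b, s)).2) := by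
  induction sigs generalizing b s with
  | nil => rfl
  | cons hd tl ih =>
    simp only [List.foldl_cons, pvStep_rel]
    exact ih _ _

lemma pvOuter_rel (all_signals : List (List String)) (b s : Int) :
    all_signals.foldl (fun t sigs => sigs.foldl pvStepA t) (mkTotals (2 * b) (2 * s)) =
    mkTotals (2 * (all_signals.foldl (fun acc sigs => sigs.foldl pvStepB acc) (b, s)).1)
             (2 * (all_signals.foldl (fun acc sigs => sigs.foldl pvStepB acc) (b, s)).2) := by
  induction all_signals generalizing b s with
  | nil => rfl
  | cons hd tl ih =>
    simp only [List.foldl_cons, pvInner_rel]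
    exact ih _ _

lemma pvInnerB_nonneg (sigs : List String) (p : Int × Int) (hb : 0 ≤ p.1) (hs : 0 ≤ p.2) :
    0 ≤ (sigs.foldl pvStepB p).1 ∧ 0 ≤ (sigs.foldl pvStepB p).2 := by
  induction sigs generalizing p with
  | nil => exact ⟨hb, hs⟩
  | cons hd tl ih =>
    obtain ⟨a, c⟩ := p
    simp only [List.foldl_cons]
    apply ih
    all_goals unfold pvStepB
    all_goals split_ifs <;> simp_all <;> omega

lemma pvFoldB_nonneg (all_signals : List (List String)) (b s : Int) (hb : 0 ≤ b) (hs : 0 ≤ s) :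
    0 ≤ (all_signals.foldl (fun acc sigs => sigs.foldl pvStepB acc) (b, s)).1 ∧
    0 ≤ (all_signals.foldl (fun acc sigs => sigs.foldl pvStepB acc) (b, s)).2 := by
  induction all_signals generalizing b s with
  | nil => exact ⟨hb, hs⟩
  | cons hd tl ih =>
    simp only [List.foldl_cons]
    obtain ⟨h1, h2⟩ := pvInnerB_nonneg hd (b, s) hb hs
    have := ih (hd.foldl pvStepB (b, s)).1 (hd.foldl pvStepB (b, s)).2 h1 h2
    simpa using this

-- Python's max over the five-key totals: Buy on ties, Sell only when strictly ahead
lemma pvMax_mkTotals (b s : Int) (hb : 0 ≤ b) (hs : 0 ≤ s) :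
    (PySem.List.max? (mkTotals (2 * b) (2 * s)).keys
       (fun k => (mkTotals (2 * b) (2 * s)).getD k 0)).getD "" =
    (if s ≤ b then "Buy Strategy" else "Sell Strategy") := by
  by_cases h : s ≤ b
  · have c1' : ¬ b < s := by omega
    have c2 : ¬ (2*b < 0) := by omega
    simp [mkTotals, PySem.List.max?, PySem.Dict.keys, PySem.Dict.getD, PySem.Dict.get?,
      List.find?, c1', c2, h]
  · have c1' : b < s := by omega
    have c2 : ¬ (2*s < 0) := by omega
    simp [mkTotals, PySem.List.max?, PySem.Dict.keys, PySem.Dict.getD, PySem.Dict.get?,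
      List.find?, c1', c2, h]

-- ===== VERDICT (by name: the statement is the Claim_ definition above) =====
theorem final_strategy_decision_spec : Claim_equal_final_strategy_decision := by
  intro all_signals _
  unfold Spec_final_strategy_decision
  rw [pvA_unfold, pvB_unfold]
  have h0 : (mkTotals 0 0) = mkTotals (2 * 0) (2 * 0) := by norm_num
  rw [h0, pvOuter_rel]
  obtain ⟨hb, hs⟩ := pvFoldB_nonneg all_signals 0 0 le_rfl le_rfl
  rw [pvMax_mkTotals _ _ hb hs]
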